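-- pv_equiv track=rewrite | github.com/StephenH69/CodeWars-Python | 7-happy-birthday-darling.py | womens_age
-- ===== SOURCE A (Python) =====
-- def womens_age(n):
--     x = 11
--     completed = False
--     while completed == False:
--         if (2 * x) == n:
--             return f"{n}? That's just 20, in base {x}!"
--         elif (2 * x) + 1 == n:
--             return f"{n}? That's just 21, in base {x}!"
--         else:
--             x+=1
-- ===== SOURCE B (Python) =====
-- def womens_age(n):
--     x = n // 2
--     if n % 2 == 0:
--         return f"{n}? That's just 20, in base {x}!"
--     else:
--         return f"{n}? That's just 21, in base {x}!"
-- ===== Notes on version B (the rewrite author's own statement) =====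
-- stated objective: faster
-- what changed: Replaces the unbounded trial loop over candidate bases with a closed-form computation: base = n//2 and parity decides between '20' and '21'.
-- outside the precondition, e.g. on womens_age(2): A does not finish within the time limit, B returns "2? That's just 20, in base 1!"
import Mathlib
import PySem

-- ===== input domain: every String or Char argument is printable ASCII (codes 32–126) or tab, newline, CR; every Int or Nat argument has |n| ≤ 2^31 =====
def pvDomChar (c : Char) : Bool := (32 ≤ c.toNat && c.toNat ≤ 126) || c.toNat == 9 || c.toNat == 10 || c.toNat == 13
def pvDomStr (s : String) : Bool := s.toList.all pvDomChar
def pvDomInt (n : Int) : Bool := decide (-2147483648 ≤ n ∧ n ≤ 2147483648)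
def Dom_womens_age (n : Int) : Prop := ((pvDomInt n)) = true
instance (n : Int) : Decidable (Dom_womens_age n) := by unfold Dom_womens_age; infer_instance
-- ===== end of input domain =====

-- B replaces A's unbounded search over bases by the closed form base = n//2 with a parity branch (O(1) vs O(n)).
-- A diverges (infinite while loop) for n < 22; those inputs are outside Pre_womens_age.

-- ===== PORT A =====
-- f"{n}? That's just 20, in base {x}!"
def pvMsg20 (n x : Int) : String :=
  PySem.Int.toStr n ++ "? That's just 20, in base " ++ PySem.Int.toStr x ++ "!"
-- f"{n}? That's just 21, in base {x}!"
def pvMsg21 (n x : Int) : String :=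
  PySem.Int.toStr n ++ "? That's just 21, in base " ++ PySem.Int.toStr x ++ "!"
-- A's while loop, step for step; the fuel only makes it total (A diverges when n < 22,
-- and the proof shows the fuel is never exhausted when 22 <= n).
def womens_ageLoop (n : Int) : Nat → Int → String
  | 0, _ => ""
  | fuel + 1, x =>
    if 2 * x = n then pvMsg20 n x
    else if 2 * x + 1 = n then pvMsg21 n x
    else womens_ageLoop n fuel (x + 1)
def womens_age (n : Int) : String := womens_ageLoop n (n - 21).toNat 11

-- ===== PORT B =====
def womens_age_alt (n : Int) : String :=
  let x := PySem.Int.floordiv n 2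
  if PySem.Int.mod n 2 = 0 then pvMsg20 n x else pvMsg21 n x

-- ===== PRECONDITION & SPEC =====
-- A's while loop never terminates for n < 22 (no base x >= 11 has 2x or 2x+1 equal to n): excluded.
def Pre_womens_age (n : Int) : Prop := 22 ≤ n
instance (n : Int) : Decidable (Pre_womens_age n) := by unfold Pre_womens_age; infer_instance
def pvWitness_womens_age : Int := (22)

def Spec_womens_age (n : Int) (out : String) : Prop := out = womens_age_alt n
instance (n : Int) (out : String) : Decidable (Spec_womens_age n out) := by unfold Spec_womens_age; infer_instance

-- ===== CLAIM (what is proved, stated in full; the proofs are below) =====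
def Claim_equal_womens_age : Prop := ∀ (n : Int), Dom_womens_age n → Pre_womens_age n → Spec_womens_age n (womens_age n)

-- ===== LEMMAS AND PROOFS =====

lemma womens_ageLoop_eq (n : Int) :
    ∀ (fuel : Nat) (x : Int), x ≤ PySem.Int.floordiv n 2 →
      (PySem.Int.floordiv n 2 - x).toNat < fuel →
      womens_ageLoop n fuel x = womens_age_alt n := by
  intro fuel
  induction fuel with
  | zero => intro x _ h; omega
  | succ f ih =>
    intro x hx hf
    have hqm := PySem.Int.floordiv_mul_add_mod n 2
    have hm1 := PySem.Int.mod_nonneg (a := n) (b := 2) (show (0:Int) < 2 by omega)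
    have hm2 := PySem.Int.mod_lt (a := n) (b := 2) (show (0:Int) < 2 by omega)
    rcases lt_or_eq_of_le hx with hlt | heq
    · -- x < n // 2 : neither branch fires, recurse
      rw [womens_ageLoop, if_neg (by omega), if_neg (by omega)]
      exact ih (x + 1) (by omega) (by omega)
    · -- x = n // 2 : the parity decides which branch fires
      by_cases hr0 : PySem.Int.mod n 2 = 0
      · rw [womens_ageLoop, if_pos (by omega)]
        simp only [womens_age_alt, if_pos hr0, heq]
      · rw [womens_ageLoop, if_neg (by omega), if_pos (by omega)]
        simp only [womens_age_alt, if_neg hr0, heq]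

-- ===== VERDICT (by name: the statement is the Claim_ definition above) =====
theorem womens_age_spec : Claim_equal_womens_age := by
  intro n _ hp
  have h22 : 22 ≤ n := hp
  have hqm := PySem.Int.floordiv_mul_add_mod n 2
  have hm1 := PySem.Int.mod_nonneg (a := n) (b := 2) (show (0:Int) < 2 by omega)
  have hm2 := PySem.Int.mod_lt (a := n) (b := 2) (show (0:Int) < 2 by omega)
  unfold Spec_womens_age womens_age
  exact womens_ageLoop_eq n _ 11 (by omega) (by omega)
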